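-- pv_equiv track=rewrite | github.com/tintinker/listeningsheets | exporter.py | fillInGaps
-- ===== SOURCE A (Python) =====
-- def fillInGaps(note_lengths):
--     taps = []
--     for i in range(len(note_lengths)):
--         time = 0
--         if i > 0:
--             for j in note_lengths[:i]:
--                 time += j
--         taps.append((time, note_lengths[i]))
--     return taps
-- ===== SOURCE B (Python) =====
-- def fillInGaps(note_lengths):
--     taps = []
--     time = 0
--     for length in note_lengths:
--         taps.append((time, length))
--         time += length
--     return taps
-- ===== Notes on version B (the rewrite author's own statement) =====
-- stated objective: faster
-- what changed: Replaces the per-index re-summation of note_lengths[:i] with a single pass carrying a running prefix-sum accumulator.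
import Mathlib
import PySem

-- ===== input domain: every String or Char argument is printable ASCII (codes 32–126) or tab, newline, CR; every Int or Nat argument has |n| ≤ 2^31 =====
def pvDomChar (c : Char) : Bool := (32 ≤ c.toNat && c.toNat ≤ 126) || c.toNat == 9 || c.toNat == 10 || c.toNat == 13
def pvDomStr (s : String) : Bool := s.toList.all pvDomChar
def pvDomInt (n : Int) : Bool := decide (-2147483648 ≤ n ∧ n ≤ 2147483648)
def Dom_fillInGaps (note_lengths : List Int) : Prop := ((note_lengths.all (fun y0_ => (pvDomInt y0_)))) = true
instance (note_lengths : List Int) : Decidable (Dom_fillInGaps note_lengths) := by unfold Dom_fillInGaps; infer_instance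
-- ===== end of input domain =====

-- B replaces A's per-index re-summation of note_lengths[:i] (O(n^2)) with one pass
-- carrying a running prefix-sum accumulator (O(n)).

-- ===== PORT A =====
-- for i in range(len(note_lengths)): time = 0; if i > 0: for j in note_lengths[:i]: time += j; taps.append((time, note_lengths[i]))
def fillInGaps (note_lengths : List Int) : List (Int × Int) :=
  (PySem.List.pyRange 0 note_lengths.length 1).foldl
    (fun taps i =>
      let time : Int :=
        if i > 0 then
          (PySem.List.slice note_lengths none (some i)).foldl (fun t j => t + j) 0
        else 0
      taps ++ [(time, PySem.List.pyGetD note_lengths i 0)])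
    []

-- ===== PORT B =====
-- single pass: state = (taps so far, running start time)
def fillInGaps_alt (note_lengths : List Int) : List (Int × Int) :=
  (note_lengths.foldl
    (fun (st : List (Int × Int) × Int) length =>
      (st.1 ++ [(st.2, length)], st.2 + length))
    ([], 0)).1

-- ===== PRECONDITION & SPEC =====
def Spec_fillInGaps (note_lengths : List Int) (out : List (Int × Int)) : Prop := out = fillInGaps_alt note_lengths
instance (note_lengths : List Int) (out : List (Int × Int)) : Decidable (Spec_fillInGaps note_lengths out) := by unfold Spec_fillInGaps; infer_instance

-- ===== CLAIM (what is proved, stated in full; the proofs are below) =====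
def Claim_equal_fillInGaps : Prop := ∀ (note_lengths : List Int), Dom_fillInGaps note_lengths → Spec_fillInGaps note_lengths (fillInGaps note_lengths)

-- ===== LEMMAS AND PROOFS =====

-- B's fold from any state: result list is acc ++ (fold from the empty list), sum threads
theorem fillInGaps_alt_state (xs : List Int) (acc : List (Int × Int)) (t : Int) :
    xs.foldl (fun (st : List (Int × Int) × Int) length =>
        (st.1 ++ [(st.2, length)], st.2 + length)) (acc, t)
      = (acc ++ (xs.foldl (fun (st : List (Int × Int) × Int) length =>
            (st.1 ++ [(st.2, length)], st.2 + length)) ([], t)).1, t + xs.sum) := by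
  induction xs generalizing acc t with
  | nil => simp
  | cons x xs ih =>
    simp only [List.foldl_cons, List.sum_cons]
    rw [ih (acc ++ [(t, x)]) (t + x), ih ([] ++ [(t, x)]) (t + x)]
    simp [add_assoc]

theorem fillInGaps_alt_append (xs : List Int) (x : Int) :
    fillInGaps_alt (xs ++ [x]) = fillInGaps_alt xs ++ [(xs.sum, x)] := by
  unfold fillInGaps_alt
  rw [List.foldl_append, fillInGaps_alt_state xs [] 0]
  simp

theorem fillInGaps_append (xs : List Int) (x : Int) :
    fillInGaps (xs ++ [x]) = fillInGaps xs ++ [(xs.sum, x)] := by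
  unfold fillInGaps
  have hlen : ((xs ++ [x]).length : Int) = (xs.length : Int) + 1 := by simp
  rw [hlen, PySem.List.pyRange_one_succ_right (by positivity), List.foldl_append]
  have hbody : ∀ taps : List (Int × Int), ∀ i ∈ PySem.List.pyRange 0 (xs.length : Int) 1,
      (fun (taps : List (Int × Int)) (i : Int) =>
        let time : Int :=
          if i > 0 then
            (PySem.List.slice (xs ++ [x]) none (some i)).foldl (fun t j => t + j) 0
          else 0
        taps ++ [(time, PySem.List.pyGetD (xs ++ [x]) i 0)]) taps i
      = (fun (taps : List (Int × Int)) (i : Int) =>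
        let time : Int :=
          if i > 0 then
            (PySem.List.slice xs none (some i)).foldl (fun t j => t + j) 0
          else 0
        taps ++ [(time, PySem.List.pyGetD xs i 0)]) taps i := by
    intro taps i hi
    rw [PySem.List.mem_pyRange_one] at hi
    obtain ⟨h0, hlt⟩ := hi
    have hnat : i.toNat < xs.length := by omega
    have hslice : PySem.List.slice (xs ++ [x]) none (some i)
        = PySem.List.slice xs none (some i) := by
      rw [PySem.List.slice_to (xs ++ [x]) h0, PySem.List.slice_to xs h0,
        List.take_append_of_le_length (by omega)]
    have hget : PySem.List.pyGetD (xs ++ [x]) i 0 = PySem.List.pyGetD xs i 0 := by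
      rw [PySem.List.pyGetD_eq_getElem (xs ++ [x]) 0 h0 (by simp; omega),
        PySem.List.pyGetD_eq_getElem xs 0 h0 (by exact_mod_cast hlt),
        List.getElem_append_left hnat]
    simp only [hslice, hget]
  rw [PySem.List.foldl_congr_mem _ _ _ _ hbody]
  simp only [List.foldl_cons, List.foldl_nil]
  congr 1
  by_cases hx : xs = []
  · subst hx; simp
  · have hpos : (0 : Int) < (xs.length : Int) := by
      have : 0 < xs.length := List.length_pos_of_ne_nil hx
      exact_mod_cast this
    have hslice : PySem.List.slice (xs ++ [x]) none (some (xs.length : Int)) = xs := by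
      rw [PySem.List.slice_to (xs ++ [x]) (by positivity)]
      simp
    have hget : PySem.List.pyGetD (xs ++ [x]) (xs.length : Int) 0 = x := by
      rw [PySem.List.pyGetD_eq_getElem (xs ++ [x]) 0 (by positivity) (by simp)]
      simp
    simp only [if_pos hpos, hslice, hget]
    rw [PySem.List.foldl_add xs (fun j => j) 0]
    simp

theorem fillInGaps_eq_alt (xs : List Int) : fillInGaps xs = fillInGaps_alt xs := by
  induction xs using List.reverseRecOn with
  | nil => rfl
  | append_singleton xs x ih =>
    rw [fillInGaps_append, fillInGaps_alt_append, ih]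

-- ===== VERDICT (by name: the statement is the Claim_ definition above) =====
theorem fillInGaps_spec : Claim_equal_fillInGaps := by
  intro xs _
  exact fillInGaps_eq_alt xs
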